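-- pv_equiv track=rewrite | github.com/JusticeDAO-LLC/complaint-generator | complaint_phases/denoiser.py | _derive_extraction_targets
-- ===== SOURCE A (Python) =====
-- from typing import Dict, List, Any, Optional, Tuple, Set
--
-- def _derive_extraction_targets(
--
--     question_type: str,
--     context: Optional[Dict[str, Any]] = None,
-- ) -> List[str]:
--     qtype = (question_type or "").strip().lower()
--     context = context if isinstance(context, dict) else {}
--     targets: List[str] = []
--     if qtype in {"timeline", "contradiction"}:
--         targets.extend(["exact_dates", "event_order"])
--     if qtype in {"responsible_party", "relationship", "requirement"}:
--         targets.extend(["actor_name", "actor_role"])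
--     if qtype in {"evidence", "requirement"}:
--         targets.extend(["document_type", "document_date", "document_owner"])
--     if qtype in {"timeline", "responsible_party", "contradiction"}:
--         targets.extend(["decision_maker", "adverse_action"])
--     if qtype in {"impact", "remedy"}:
--         targets.extend(["harm_type", "requested_outcome"])
--     gap_type = str(context.get("gap_type") or "").strip().lower()
--     if gap_type in {"missing_written_notice", "missing_response_dates"}:
--         targets.extend(["notice_chain", "notice_date", "response_timing"])
--     if gap_type in {"retaliation_missing_causation", "retaliation_missing_sequence", "retaliation_missing_sequencing_dates"}:
--         targets.extend(["protected_activity", "adverse_action", "causation_link"])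
--     if gap_type in {"missing_decision_timeline", "missing_exact_action_dates", "missing_hearing_timing"}:
--         targets.extend(["exact_dates", "event_order", "response_timing"])
--     if gap_type in {"missing_staff_identity", "missing_staff_title"}:
--         targets.extend(["actor_name", "actor_role", "decision_maker"])
--     deduped: List[str] = []
--     for target in targets:
--         if target and target not in deduped:
--             deduped.append(target)
--     return deduped
-- ===== SOURCE B (Python) =====
-- # Precomputed inverted index: each trigger value maps directly to its (already
-- # deduplicated) target list; the result is qt plus the gap targets not already in qt.
-- _QTARGETS = {
--     "timeline": ["exact_dates", "event_order", "decision_maker", "adverse_action"],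
--     "contradiction": ["exact_dates", "event_order", "decision_maker", "adverse_action"],
--     "responsible_party": ["actor_name", "actor_role", "decision_maker", "adverse_action"],
--     "relationship": ["actor_name", "actor_role"],
--     "requirement": ["actor_name", "actor_role", "document_type", "document_date", "document_owner"],
--     "evidence": ["document_type", "document_date", "document_owner"],
--     "impact": ["harm_type", "requested_outcome"],
--     "remedy": ["harm_type", "requested_outcome"],
-- }
--
-- _GTARGETS = {
--     "missing_written_notice": ["notice_chain", "notice_date", "response_timing"],
--     "missing_response_dates": ["notice_chain", "notice_date", "response_timing"],
--     "retaliation_missing_causation": ["protected_activity", "adverse_action", "causation_link"],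
--     "retaliation_missing_sequence": ["protected_activity", "adverse_action", "causation_link"],
--     "retaliation_missing_sequencing_dates": ["protected_activity", "adverse_action", "causation_link"],
--     "missing_decision_timeline": ["exact_dates", "event_order", "response_timing"],
--     "missing_exact_action_dates": ["exact_dates", "event_order", "response_timing"],
--     "missing_hearing_timing": ["exact_dates", "event_order", "response_timing"],
--     "missing_staff_identity": ["actor_name", "actor_role", "decision_maker"],
--     "missing_staff_title": ["actor_name", "actor_role", "decision_maker"],
-- }
--
--
-- def _derive_extraction_targets(question_type, context=None):
--     q = (question_type or "").strip().lower()
--     ctx = context if isinstance(context, dict) else {}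
--     g = str(ctx.get("gap_type") or "").strip().lower()
--     qt = _QTARGETS.get(q, [])
--     gt = _GTARGETS.get(g, [])
--     return qt + [t for t in gt if t not in qt]
-- ===== Notes on version B (the rewrite author's own statement) =====
-- stated objective: alternative
-- what changed: Replaces the nine runtime membership tests and the growing seen-list dedup by a precomputed inverted index (trigger value -> already-merged target list): two direct dict lookups, then concatenation with a single filter keeping only gap targets absent from the qtype list, instead of an accumulator dedup loop.
import Mathlib
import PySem

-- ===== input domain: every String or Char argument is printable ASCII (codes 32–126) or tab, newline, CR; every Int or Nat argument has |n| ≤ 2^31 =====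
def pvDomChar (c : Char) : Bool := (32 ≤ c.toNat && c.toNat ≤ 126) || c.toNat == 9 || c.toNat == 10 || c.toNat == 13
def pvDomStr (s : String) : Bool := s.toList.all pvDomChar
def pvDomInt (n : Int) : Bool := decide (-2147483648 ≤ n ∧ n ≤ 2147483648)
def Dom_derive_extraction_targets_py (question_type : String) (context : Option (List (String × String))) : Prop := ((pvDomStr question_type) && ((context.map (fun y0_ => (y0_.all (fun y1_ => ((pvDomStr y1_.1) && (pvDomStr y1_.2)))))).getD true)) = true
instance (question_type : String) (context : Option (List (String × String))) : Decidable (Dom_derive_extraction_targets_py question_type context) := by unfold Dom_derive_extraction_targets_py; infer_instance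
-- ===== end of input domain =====

-- B replaces A's nine runtime membership rules and the growing seen-list dedup by a
-- precomputed inverted index (trigger value -> merged target list): two lookups plus one filter.

-- ===== PORT A =====
-- literal transliteration of _derive_extraction_targets; '(x or "")' ported as
-- 'if x == "" then "" else x'; 'context if isinstance(context, dict) else {}' as 'context.getD []';
-- 'context.get("gap_type")' as first-match lookup in the assoc list (map snd of find?)
def derive_extraction_targets_py (question_type : String) (context : Option (List (String × String))) : List String :=
  let qtype := PySem.Str.lower (PySem.Str.strip (if question_type == "" then "" else question_type))
  let ctx : List (String × String) := context.getD []
  let targets : List String := []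
  let targets := if qtype == "timeline" || qtype == "contradiction" then targets ++ ["exact_dates", "event_order"] else targets
  let targets := if qtype == "responsible_party" || qtype == "relationship" || qtype == "requirement" then targets ++ ["actor_name", "actor_role"] else targets
  let targets := if qtype == "evidence" || qtype == "requirement" then targets ++ ["document_type", "document_date", "document_owner"] else targets
  let targets := if qtype == "timeline" || qtype == "responsible_party" || qtype == "contradiction" then targets ++ ["decision_maker", "adverse_action"] else targets
  let targets := if qtype == "impact" || qtype == "remedy" then targets ++ ["harm_type", "requested_outcome"] else targets
  let gv := ((ctx.find? (fun p => p.1 == "gap_type")).map Prod.snd).getD ""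
  let gap_type := PySem.Str.lower (PySem.Str.strip (if gv == "" then "" else gv))
  let targets := if gap_type == "missing_written_notice" || gap_type == "missing_response_dates" then targets ++ ["notice_chain", "notice_date", "response_timing"] else targets
  let targets := if gap_type == "retaliation_missing_causation" || gap_type == "retaliation_missing_sequence" || gap_type == "retaliation_missing_sequencing_dates" then targets ++ ["protected_activity", "adverse_action", "causation_link"] else targets
  let targets := if gap_type == "missing_decision_timeline" || gap_type == "missing_exact_action_dates" || gap_type == "missing_hearing_timing" then targets ++ ["exact_dates", "event_order", "response_timing"] else targets
  let targets := if gap_type == "missing_staff_identity" || gap_type == "missing_staff_title" then targets ++ ["actor_name", "actor_role", "decision_maker"] else targets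
  targets.foldl (fun deduped t => if t != "" && !(deduped.any (fun d => t == d)) then deduped ++ [t] else deduped) []

-- ===== PORT B =====
-- Source B's precomputed inverted index _QTARGETS (trigger qtype -> already-merged target list)
def pvQMap : List (String × List String) :=
  [ ("timeline", ["exact_dates", "event_order", "decision_maker", "adverse_action"]),
    ("contradiction", ["exact_dates", "event_order", "decision_maker", "adverse_action"]),
    ("responsible_party", ["actor_name", "actor_role", "decision_maker", "adverse_action"]),
    ("relationship", ["actor_name", "actor_role"]),
    ("requirement", ["actor_name", "actor_role", "document_type", "document_date", "document_owner"]),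
    ("evidence", ["document_type", "document_date", "document_owner"]),
    ("impact", ["harm_type", "requested_outcome"]),
    ("remedy", ["harm_type", "requested_outcome"]) ]

-- Source B's precomputed inverted index _GTARGETS (gap_type -> target list)
def pvGMap : List (String × List String) :=
  [ ("missing_written_notice", ["notice_chain", "notice_date", "response_timing"]),
    ("missing_response_dates", ["notice_chain", "notice_date", "response_timing"]),
    ("retaliation_missing_causation", ["protected_activity", "adverse_action", "causation_link"]),
    ("retaliation_missing_sequence", ["protected_activity", "adverse_action", "causation_link"]),
    ("retaliation_missing_sequencing_dates", ["protected_activity", "adverse_action", "causation_link"]),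
    ("missing_decision_timeline", ["exact_dates", "event_order", "response_timing"]),
    ("missing_exact_action_dates", ["exact_dates", "event_order", "response_timing"]),
    ("missing_hearing_timing", ["exact_dates", "event_order", "response_timing"]),
    ("missing_staff_identity", ["actor_name", "actor_role", "decision_maker"]),
    ("missing_staff_title", ["actor_name", "actor_role", "decision_maker"]) ]

-- literal transliteration of Source B: dict.get(k, []) is first-match assoc lookup with default;
-- the comprehension '[t for t in gt if t not in qt]' is gt.filter (not-contains-in-qt)
def derive_extraction_targets_py_alt (question_type : String) (context : Option (List (String × String))) : List String :=
  let q := PySem.Str.lower (PySem.Str.strip (if question_type == "" then "" else question_type))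
  let ctx : List (String × String) := context.getD []
  let gv := ((ctx.find? (fun p => p.1 == "gap_type")).map Prod.snd).getD ""
  let g := PySem.Str.lower (PySem.Str.strip (if gv == "" then "" else gv))
  let qt := ((pvQMap.find? (fun p => p.1 == q)).map Prod.snd).getD []
  let gt := ((pvGMap.find? (fun p => p.1 == g)).map Prod.snd).getD []
  qt ++ gt.filter (fun t => !qt.contains t)

-- ===== PRECONDITION & SPEC =====
def Spec_derive_extraction_targets_py (question_type : String) (context : Option (List (String × String))) (out : List String) : Prop := out = derive_extraction_targets_py_alt question_type context
instance (question_type : String) (context : Option (List (String × String))) (out : List String) : Decidable (Spec_derive_extraction_targets_py question_type context out) := by unfold Spec_derive_extraction_targets_py; infer_instance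

-- ===== CLAIM (what is proved, stated in full; the proofs are below) =====
def Claim_equal_derive_extraction_targets_py : Prop := ∀ (question_type : String) (context : Option (List (String × String))), Dom_derive_extraction_targets_py question_type context → Spec_derive_extraction_targets_py question_type context (derive_extraction_targets_py question_type context)

-- ===== LEMMAS AND PROOFS =====

-- A's dedup fold characterised: it appends exactly the not-yet-seen, nonempty elements
theorem fold_filter (G : List String) (acc : List String)
    (hne : ∀ t ∈ G, t ≠ "") (hnd : G.Nodup) :
    G.foldl (fun deduped t => if t != "" && !(deduped.any (fun d => t == d)) then deduped ++ [t] else deduped) acc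
      = acc ++ G.filter (fun t => !acc.contains t) := by
  induction G generalizing acc with
  | nil => simp
  | cons t G ih =>
    have ht : t ≠ "" := hne t (List.mem_cons_self ..)
    have htG : t ∉ G := (List.nodup_cons.1 hnd).1
    simp only [List.foldl_cons]
    by_cases hmem : t ∈ acc
    · have hc : (acc.any fun d => t == d) = true := List.any_eq_true.2 ⟨t, hmem, by simp⟩
      rw [show (if t != "" && !(acc.any (fun d => t == d)) then acc ++ [t] else acc) = acc by simp [hc]]
      rw [ih acc (fun x hx => hne x (List.mem_cons_of_mem _ hx)) (List.nodup_cons.1 hnd).2]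
      congr 1
      simp [hmem]
    · have hc : (acc.any fun d => t == d) = false := by
        rw [List.any_eq_false]
        intro x hx
        simp only [beq_iff_eq]
        intro h
        exact hmem (by rw [h]; exact hx)
      rw [show (if t != "" && !(acc.any (fun d => t == d)) then acc ++ [t] else acc) = acc ++ [t] by simp [hc, ht]]
      rw [ih (acc ++ [t]) (fun x hx => hne x (List.mem_cons_of_mem _ hx)) (List.nodup_cons.1 hnd).2]
      simp only [List.filter_cons]
      rw [show (!acc.contains t) = true by simp [hmem]]
      rw [List.append_assoc, List.singleton_append]
      congr 2
      apply List.filter_congr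
      intro x hx
      have hxt : x ≠ t := fun h => htG (h ▸ hx)
      simp [hxt, List.contains_eq_mem]

-- the dedup fold over a concatenation of two clean lists is concat-plus-filter (B's shape)
theorem fold_two (Q L : List String) (hQnd : Q.Nodup) (hQne : ∀ t ∈ Q, t ≠ "")
    (hLnd : L.Nodup) (hLne : ∀ t ∈ L, t ≠ "") :
    (Q ++ L).foldl (fun deduped t => if t != "" && !(deduped.any (fun d => t == d)) then deduped ++ [t] else deduped) []
      = Q ++ L.filter (fun t => !Q.contains t) := by
  rw [List.foldl_append, fold_filter Q [] hQne hQnd]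
  simp only [List.nil_append]
  rw [show Q.filter (fun t => !([] : List String).contains t) = Q by simp]
  exact fold_filter L Q hLne hLnd

-- A's four gap_type if-blocks followed by the dedup fold, over any clean prefix Q,
-- equal Q plus B's _GTARGETS lookup filtered by Q (cases on g: the trigger sets are disjoint)
theorem coreG (g : String) (Q : List String) (hnd : Q.Nodup) (hne : ∀ t ∈ Q, t ≠ "") :
    (let targets := if g == "missing_written_notice" || g == "missing_response_dates" then Q ++ ["notice_chain", "notice_date", "response_timing"] else Q
     let targets := if g == "retaliation_missing_causation" || g == "retaliation_missing_sequence" || g == "retaliation_missing_sequencing_dates" then targets ++ ["protected_activity", "adverse_action", "causation_link"] else targets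
     let targets := if g == "missing_decision_timeline" || g == "missing_exact_action_dates" || g == "missing_hearing_timing" then targets ++ ["exact_dates", "event_order", "response_timing"] else targets
     let targets := if g == "missing_staff_identity" || g == "missing_staff_title" then targets ++ ["actor_name", "actor_role", "decision_maker"] else targets
     targets.foldl (fun deduped t => if t != "" && !(deduped.any (fun d => t == d)) then deduped ++ [t] else deduped) [])
      = Q ++ (((pvGMap.find? (fun p => p.1 == g)).map Prod.snd).getD []).filter (fun t => !Q.contains t) := by
  by_cases h1 : g = "missing_written_notice"
  · subst h1; simpa [pvGMap] using fold_two Q ["notice_chain", "notice_date", "response_timing"] hnd hne (by decide) (by decide)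
  by_cases h2 : g = "missing_response_dates"
  · subst h2; simpa [pvGMap] using fold_two Q ["notice_chain", "notice_date", "response_timing"] hnd hne (by decide) (by decide)
  by_cases h3 : g = "retaliation_missing_causation"
  · subst h3; simpa [pvGMap] using fold_two Q ["protected_activity", "adverse_action", "causation_link"] hnd hne (by decide) (by decide)
  by_cases h4 : g = "retaliation_missing_sequence"
  · subst h4; simpa [pvGMap] using fold_two Q ["protected_activity", "adverse_action", "causation_link"] hnd hne (by decide) (by decide)
  by_cases h5 : g = "retaliation_missing_sequencing_dates"
  · subst h5; simpa [pvGMap] using fold_two Q ["protected_activity", "adverse_action", "causation_link"] hnd hne (by decide) (by decide)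
  by_cases h6 : g = "missing_decision_timeline"
  · subst h6; simpa [pvGMap] using fold_two Q ["exact_dates", "event_order", "response_timing"] hnd hne (by decide) (by decide)
  by_cases h7 : g = "missing_exact_action_dates"
  · subst h7; simpa [pvGMap] using fold_two Q ["exact_dates", "event_order", "response_timing"] hnd hne (by decide) (by decide)
  by_cases h8 : g = "missing_hearing_timing"
  · subst h8; simpa [pvGMap] using fold_two Q ["exact_dates", "event_order", "response_timing"] hnd hne (by decide) (by decide)
  by_cases h9 : g = "missing_staff_identity"
  · subst h9; simpa [pvGMap] using fold_two Q ["actor_name", "actor_role", "decision_maker"] hnd hne (by decide) (by decide)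
  by_cases h10 : g = "missing_staff_title"
  · subst h10; simpa [pvGMap] using fold_two Q ["actor_name", "actor_role", "decision_maker"] hnd hne (by decide) (by decide)
  simpa [pvGMap, h1, h2, h3, h4, h5, h6, h7, h8, h9, h10, Ne.symm h1, Ne.symm h2, Ne.symm h3,
      Ne.symm h4, Ne.symm h5, Ne.symm h6, Ne.symm h7, Ne.symm h8, Ne.symm h9, Ne.symm h10] using
    fold_two Q [] hnd hne (by decide) (by decide)

-- the full rule chain plus dedup fold equals B's two lookups plus filter (cases on q)
theorem core (q g : String) :
    (let targets : List String := []
     let targets := if q == "timeline" || q == "contradiction" then targets ++ ["exact_dates", "event_order"] else targets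
     let targets := if q == "responsible_party" || q == "relationship" || q == "requirement" then targets ++ ["actor_name", "actor_role"] else targets
     let targets := if q == "evidence" || q == "requirement" then targets ++ ["document_type", "document_date", "document_owner"] else targets
     let targets := if q == "timeline" || q == "responsible_party" || q == "contradiction" then targets ++ ["decision_maker", "adverse_action"] else targets
     let targets := if q == "impact" || q == "remedy" then targets ++ ["harm_type", "requested_outcome"] else targets
     let targets := if g == "missing_written_notice" || g == "missing_response_dates" then targets ++ ["notice_chain", "notice_date", "response_timing"] else targets
     let targets := if g == "retaliation_missing_causation" || g == "retaliation_missing_sequence" || g == "retaliation_missing_sequencing_dates" then targets ++ ["protected_activity", "adverse_action", "causation_link"] else targets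
     let targets := if g == "missing_decision_timeline" || g == "missing_exact_action_dates" || g == "missing_hearing_timing" then targets ++ ["exact_dates", "event_order", "response_timing"] else targets
     let targets := if g == "missing_staff_identity" || g == "missing_staff_title" then targets ++ ["actor_name", "actor_role", "decision_maker"] else targets
     targets.foldl (fun deduped t => if t != "" && !(deduped.any (fun d => t == d)) then deduped ++ [t] else deduped) [])
      = ((pvQMap.find? (fun p => p.1 == q)).map Prod.snd).getD [] ++
          ((((pvGMap.find? (fun p => p.1 == g)).map Prod.snd).getD []).filter
            (fun t => !(((pvQMap.find? (fun p => p.1 == q)).map Prod.snd).getD []).contains t)) := by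
  by_cases h1 : q = "timeline"
  · subst h1; simpa [pvQMap] using coreG g ["exact_dates", "event_order", "decision_maker", "adverse_action"] (by decide) (by decide)
  by_cases h2 : q = "contradiction"
  · subst h2; simpa [pvQMap] using coreG g ["exact_dates", "event_order", "decision_maker", "adverse_action"] (by decide) (by decide)
  by_cases h3 : q = "responsible_party"
  · subst h3; simpa [pvQMap] using coreG g ["actor_name", "actor_role", "decision_maker", "adverse_action"] (by decide) (by decide)
  by_cases h4 : q = "relationship"
  · subst h4; simpa [pvQMap] using coreG g ["actor_name", "actor_role"] (by decide) (by decide)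
  by_cases h5 : q = "requirement"
  · subst h5; simpa [pvQMap] using coreG g ["actor_name", "actor_role", "document_type", "document_date", "document_owner"] (by decide) (by decide)
  by_cases h6 : q = "evidence"
  · subst h6; simpa [pvQMap] using coreG g ["document_type", "document_date", "document_owner"] (by decide) (by decide)
  by_cases h7 : q = "impact"
  · subst h7; simpa [pvQMap] using coreG g ["harm_type", "requested_outcome"] (by decide) (by decide)
  by_cases h8 : q = "remedy"
  · subst h8; simpa [pvQMap] using coreG g ["harm_type", "requested_outcome"] (by decide) (by decide)
  simpa [pvQMap, h1, h2, h3, h4, h5, h6, h7, h8, Ne.symm h1, Ne.symm h2, Ne.symm h3, Ne.symm h4,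
      Ne.symm h5, Ne.symm h6, Ne.symm h7, Ne.symm h8] using coreG g [] (by decide) (by decide)

-- ===== VERDICT (by name: the statement is the Claim_ definition above) =====
theorem derive_extraction_targets_py_spec : Claim_equal_derive_extraction_targets_py := by
  intro question_type context _
  unfold Spec_derive_extraction_targets_py derive_extraction_targets_py derive_extraction_targets_py_alt
  simp only []
  generalize PySem.Str.lower (PySem.Str.strip (if question_type == "" then "" else question_type)) = q
  generalize PySem.Str.lower (PySem.Str.strip
      (if (((context.getD []).find? (fun p => p.1 == "gap_type")).map Prod.snd).getD "" == "" then ""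
       else (((context.getD []).find? (fun p => p.1 == "gap_type")).map Prod.snd).getD "")) = g
  exact core q g
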